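-- pv_equiv track=rewrite | github.com/amalthomas2003/NPTEL | DSA_using_Python/Week3.py | sumsquare
-- ===== SOURCE A (Python) =====
-- def sumsquare(l):
--     list1=[0,0]
--     for i in l:
--         if i%2==0:
--             list1[1]+=pow(i,2)
--         else:
--             list1[0]+=pow(i,2)
--     return list1
-- ===== SOURCE B (Python) =====
-- def sumsquare(l):
--     return [sum(i*i for i in l if i % 2 != 0),
--             sum(i*i for i in l if i % 2 == 0)]
-- ===== Notes on version B (the rewrite author's own statement) =====
-- stated objective: simpler
-- what changed: Replaces the single interleaved loop mutating a shared two-slot list with two independent filtered comprehensions, one per parity, whose sums form the result list directly.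
import Mathlib
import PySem

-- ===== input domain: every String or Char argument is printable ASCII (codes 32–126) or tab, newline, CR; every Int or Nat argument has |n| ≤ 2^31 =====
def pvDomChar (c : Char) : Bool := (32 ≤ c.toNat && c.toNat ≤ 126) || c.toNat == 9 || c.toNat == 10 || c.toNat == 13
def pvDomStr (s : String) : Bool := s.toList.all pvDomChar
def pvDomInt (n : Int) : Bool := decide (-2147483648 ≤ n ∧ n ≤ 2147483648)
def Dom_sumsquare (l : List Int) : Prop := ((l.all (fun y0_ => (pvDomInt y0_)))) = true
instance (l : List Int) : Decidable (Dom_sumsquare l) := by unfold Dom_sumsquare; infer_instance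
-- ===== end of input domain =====

-- B computes the odd/even square sums as two independent filtered passes instead of one
-- interleaved loop with a shared accumulator (objective: simpler).

-- ===== PORT A =====
-- list1 = [0,0] is modelled as the pair (list1[0], list1[1]); the loop updates it in place.
def sumsquare (l : List Int) : List Int :=
  let list1 :=
    l.foldl (fun (list1 : Int × Int) i =>
      if PySem.Int.mod i 2 = 0 then (list1.1, list1.2 + i * i)
      else (list1.1 + i * i, list1.2)) (0, 0)
  [list1.1, list1.2]

-- ===== PORT B =====
def sumsquare_alt (l : List Int) : List Int :=
  [((l.filter (fun i => PySem.Int.mod i 2 != 0)).map (fun i => i * i)).sum,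
   ((l.filter (fun i => PySem.Int.mod i 2 == 0)).map (fun i => i * i)).sum]

-- ===== PRECONDITION & SPEC =====
def Spec_sumsquare (l : List Int) (out : List Int) : Prop := out = sumsquare_alt l
instance (l : List Int) (out : List Int) : Decidable (Spec_sumsquare l out) := by unfold Spec_sumsquare; infer_instance

-- ===== CLAIM (what is proved, stated in full; the proofs are below) =====
def Claim_equal_sumsquare : Prop := ∀ (l : List Int), Dom_sumsquare l → Spec_sumsquare l (sumsquare l)

-- ===== LEMMAS AND PROOFS =====

-- ===== VERDICT (by name: the statement is the Claim_ definition above) =====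
theorem pv_fold (l : List Int) (o e : Int) :
    l.foldl (fun (list1 : Int × Int) i =>
      if PySem.Int.mod i 2 = 0 then (list1.1, list1.2 + i * i)
      else (list1.1 + i * i, list1.2)) (o, e)
    = (o + ((l.filter (fun i => PySem.Int.mod i 2 != 0)).map (fun i => i * i)).sum,
       e + ((l.filter (fun i => PySem.Int.mod i 2 == 0)).map (fun i => i * i)).sum) := by
  induction l generalizing o e with
  | nil => simp
  | cons x xs ih =>
    rw [List.foldl_cons]
    by_cases h : PySem.Int.mod x 2 = 0
    · have h1 : (PySem.Int.mod x 2 == 0) = true := beq_iff_eq.mpr h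
      have h2 : (PySem.Int.mod x 2 != 0) = false := by rw [bne, h1]; rfl
      rw [if_pos h, ih, List.filter_cons, List.filter_cons, h1, h2]
      simp only [if_true, Bool.false_eq_true, if_false, List.map_cons, List.sum_cons]
      exact Prod.ext rfl (by ring)
    · have h1 : (PySem.Int.mod x 2 == 0) = false := beq_eq_false_iff_ne.mpr h
      have h2 : (PySem.Int.mod x 2 != 0) = true := by rw [bne, h1]; rfl
      rw [if_neg h, ih, List.filter_cons, List.filter_cons, h1, h2]
      simp only [if_true, Bool.false_eq_true, if_false, List.map_cons, List.sum_cons]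
      exact Prod.ext (by ring) rfl

theorem sumsquare_spec : Claim_equal_sumsquare := by
  intro l _
  show _ = _
  unfold sumsquare sumsquare_alt
  rw [pv_fold]
  simp
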